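-- pv_equiv track=rewrite | github.com/obulreddy369/leetcode | Sandwiched_Vowels - GFG/sandwiched-vowels.py | Sandwiched_Vowel
-- ===== SOURCE A (Python) =====
-- def Sandwiched_Vowel(s):
--     #Complete the function
--     vowels=['a','e','i','o','u']
--     s=list(s)
--     li=s[::]#this creates a copy of string ,by modifying the list the string cannot change
--     for i in range(1,len(s)-1):
--         if s[i-1] not in vowels and s[i+1] not in vowels and s[i] in vowels:
--             li[i]=0# This line assigns the value 0 to the element at index i in the list li. In this line,
--                         # i is a variable that presumably holds a specific index value.
--     li=[x for x in li if x!=0]#This line creates a new list comprehension. It iterates over each element x in the original list li and includes it in the new list only if x is not equal to 0. In other words, it filters out all 0 values from the list. After this line of code, li will contain only the elements from the original list that are not equal to 0.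
--     return "".join(li)#This line joins the elements of the modified list li into a single string. It uses the join() method of strings to concatenate the elements in the list. The "" empty string is used as a separator, which means that the elements will be concatenated together without any spaces or characters in between. The result is a single string containing all the non-zero elements from the original list.
-- ===== SOURCE B (Python) =====
-- from itertools import groupby
--
-- def Sandwiched_Vowel(s):
--     # Run-length view: group the string into maximal runs of vowels / non-vowels.
--     # A vowel is sandwiched iff it forms a vowel run of length 1 that is neither
--     # the first nor the last run (maximality gives non-vowel neighbours on both sides).
--     runs = [''.join(g) for _, g in groupby(s, key=lambda c: c in 'aeiou')]
--     kept = [r for j, r in enumerate(runs)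
--             if j == 0 or j == len(runs) - 1 or not (len(r) == 1 and r in 'aeiou')]
--     return ''.join(kept)
-- ===== Notes on version B (the rewrite author's own statement) =====
-- stated objective: alternative
-- what changed: B reformulates the task by run-length grouping: it splits the string into maximal vowel/non-vowel runs with itertools.groupby and drops exactly the singleton vowel runs that are neither the first nor the last run (maximality guarantees non-vowel neighbours), instead of A's copy-the-list, mark sandwiched indices with a 0 sentinel over range(1,len-1), filter the zeros and join.
import Mathlib
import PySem

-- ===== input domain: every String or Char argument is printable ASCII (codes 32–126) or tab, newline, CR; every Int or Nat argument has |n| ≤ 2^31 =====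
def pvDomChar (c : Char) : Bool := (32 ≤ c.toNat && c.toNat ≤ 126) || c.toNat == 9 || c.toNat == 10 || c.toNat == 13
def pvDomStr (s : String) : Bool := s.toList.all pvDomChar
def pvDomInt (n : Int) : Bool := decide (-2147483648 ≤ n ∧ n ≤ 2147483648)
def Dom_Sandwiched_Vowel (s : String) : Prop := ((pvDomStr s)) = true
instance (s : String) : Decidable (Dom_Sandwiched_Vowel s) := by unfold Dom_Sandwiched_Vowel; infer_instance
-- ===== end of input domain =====

-- B replaces A's mark-with-sentinel-then-filter pass over range(1,len-1) by a run-length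
-- decomposition (groupby): drop exactly the singleton vowel runs that are neither first nor last run.


-- ===== PORT A =====
-- Python list cells that hold either a character or the sentinel 0 are modelled as Option Char
-- (none = the sentinel 0). The pyGetD defaults are never used: loop indices keep i-1, i, i+1 in range.
def Sandwiched_Vowel (s : String) : String :=
  let vowels : List Char := ['a', 'e', 'i', 'o', 'u']
  let sl : List Char := s.toList
  let li0 : List (Option Char) := sl.map some
  let li := (PySem.List.pyRange 1 ((sl.length : Int) - 1) 1).foldl
    (fun li i =>
      if PySem.List.pyGetD sl (i - 1) ' ' ∉ vowels ∧ PySem.List.pyGetD sl (i + 1) ' ' ∉ vowels ∧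
          PySem.List.pyGetD sl i ' ' ∈ vowels
      then PySem.List.pySetD li i none else li) li0
  let li2 := li.filter (fun x => x != none)
  String.ofList (li2.filterMap id)

-- ===== PORT B =====
-- `c in 'aeiou'` (the groupby key)
def pvIsV (c : Char) : Bool := decide (c ∈ (['a', 'e', 'i', 'o', 'u'] : List Char))

-- itertools.groupby(s, key): the maximal runs of consecutive characters with equal key,
-- each run already joined back to its character list ( ''.join(g) ).
def pvRuns : List Char → List (List Char)
  | [] => []
  | c :: t =>
    (c :: t.takeWhile (fun d => pvIsV d == pvIsV c)) ::
      pvRuns (t.dropWhile (fun d => pvIsV d == pvIsV c))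
termination_by l => l.length
decreasing_by
  have := List.length_dropWhile_le (fun d => pvIsV d == pvIsV c) t
  simp only [List.length_cons]; omega

-- `r in 'aeiou'` is only evaluated when len(r) == 1 (short-circuit `and`), where the Python
-- substring test coincides with character membership: ported as pvIsV of the (guarded) head.
def Sandwiched_Vowel_alt (s : String) : String :=
  let runs := pvRuns s.toList
  let kept := (PySem.List.enumerate runs).filter
    (fun jr => jr.1 == 0 || jr.1 == (runs.length : Int) - 1 ||
      !(jr.2.length == 1 && pvIsV (jr.2.headD ' ')))
  String.ofList (kept.map (·.2)).flatten

-- ===== PRECONDITION & SPEC =====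
def Spec_Sandwiched_Vowel (s : String) (out : String) : Prop := out = Sandwiched_Vowel_alt s
instance (s : String) (out : String) : Decidable (Spec_Sandwiched_Vowel s out) := by unfold Spec_Sandwiched_Vowel; infer_instance

-- ===== CLAIM (what is proved, stated in full; the proofs are below) =====
def Claim_equal_Sandwiched_Vowel : Prop := ∀ (s : String), Dom_Sandwiched_Vowel s → Spec_Sandwiched_Vowel s (Sandwiched_Vowel s)

-- ===== LEMMAS AND PROOFS =====

def pvSand (p c n : Char) : Bool := !pvIsV p && !pvIsV n && pvIsV c

theorem pvSand_iff (p c n : Char) :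
    pvSand p c n = true ↔
      (p ∉ (['a', 'e', 'i', 'o', 'u'] : List Char) ∧ n ∉ (['a', 'e', 'i', 'o', 'u'] : List Char) ∧
        c ∈ (['a', 'e', 'i', 'o', 'u'] : List Char)) := by
  simp only [pvSand, pvIsV, Bool.and_eq_true, Bool.not_eq_eq_eq_not, Bool.not_true,
    decide_eq_false_iff_not, decide_eq_true_eq, List.mem_cons]
  tauto

-- the kept characters after position 0, given the previous original character p
def pvSpec : Char → List Char → List Char
  | _, [] => []
  | _, [c] => [c]
  | p, c :: n :: r => (if pvSand p c n then [] else [c]) ++ pvSpec c (n :: r)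

def pvSpecTop : List Char → List Char
  | [] => []
  | a :: t => a :: pvSpec a t

-- A's marked list from position 1 on, given the previous original character p
def pvMarks : Char → List Char → List (Option Char)
  | _, [] => []
  | _, [c] => [some c]
  | p, c :: n :: r => (if pvSand p c n then none else some c) :: pvMarks c (n :: r)

def pvMarksTop : List Char → List (Option Char)
  | [] => []
  | a :: t => some a :: pvMarks a t

theorem pvMarks_length (p : Char) (t : List Char) : (pvMarks p t).length = t.length := by
  induction t generalizing p with
  | nil => simp [pvMarks]
  | cons c t ih =>
    cases t with
    | nil => simp [pvMarks]
    | cons n r => simp [pvMarks, ih]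

theorem pvMarks_filterMap (p : Char) (t : List Char) :
    (pvMarks p t).filterMap id = pvSpec p t := by
  induction t generalizing p with
  | nil => simp [pvMarks, pvSpec]
  | cons c t ih =>
    cases t with
    | nil => simp [pvMarks, pvSpec]
    | cons n r =>
      by_cases h : pvSand p c n = true
      · rw [show pvMarks p (c :: n :: r) = none :: pvMarks c (n :: r) by simp [pvMarks, h],
          show pvSpec p (c :: n :: r) = pvSpec c (n :: r) by simp [pvSpec, h],
          show List.filterMap id (none :: pvMarks c (n :: r))
            = List.filterMap id (pvMarks c (n :: r)) from rfl]
        exact ih c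
      · rw [show pvMarks p (c :: n :: r) = some c :: pvMarks c (n :: r) by simp [pvMarks, h],
          show pvSpec p (c :: n :: r) = c :: pvSpec c (n :: r) by simp [pvSpec, h],
          show List.filterMap id (some c :: pvMarks c (n :: r))
            = c :: List.filterMap id (pvMarks c (n :: r)) from rfl]
        rw [ih c]

theorem pvFilter_ne_none_filterMap (l : List (Option Char)) :
    (l.filter (fun x => x != none)).filterMap id = l.filterMap id := by
  induction l with
  | nil => rfl
  | cons x l ih =>
    cases x with
    | none =>
      rw [show (none :: l).filter (fun x => x != none) = l.filter (fun x => x != none) from rfl,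
        show List.filterMap id (none :: l) = List.filterMap id l from rfl]
      exact ih
    | some v =>
      rw [show (some v :: l).filter (fun x => x != none)
          = some v :: l.filter (fun x => x != none) from rfl,
        show List.filterMap id (some v :: l.filter (fun x => x != none))
          = v :: List.filterMap id (l.filter (fun x => x != none)) from rfl,
        show List.filterMap id (some v :: l) = v :: List.filterMap id l from rfl]
      rw [ih]

theorem pvFoldA_length (C : Int → Prop) [DecidablePred C] (I : List Int)
    (li : List (Option Char)) :
    (I.foldl (fun li i => if C i then PySem.List.pySetD li i none else li) li).length
      = li.length := by
  induction I generalizing li with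
  | nil => rfl
  | cons i I ih =>
    simp only [List.foldl_cons]
    rw [ih]
    by_cases h : C i <;> simp [h, PySem.List.length_pySetD]

theorem pvFoldA_getElem? (C : Int → Prop) [DecidablePred C] (I : List Int)
    (li : List (Option Char)) (j : Nat) (hj : j < li.length)
    (hI : ∀ i ∈ I, 0 ≤ i) :
    (I.foldl (fun li i => if C i then PySem.List.pySetD li i none else li) li)[j]?
      = if ((j : Int) ∈ I ∧ C (j : Int)) then some none else li[j]? := by
  induction I generalizing li with
  | nil => simp
  | cons i I ih =>
    have hi : 0 ≤ i := hI i (by simp)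
    have hI' : ∀ i' ∈ I, 0 ≤ i' := fun i' h => hI i' (by simp [h])
    simp only [List.foldl_cons]
    have hlen : (if C i then PySem.List.pySetD li i none else li).length = li.length := by
      by_cases h : C i <;> simp [h, PySem.List.length_pySetD]
    rw [ih _ (by omega) hI']
    by_cases h1 : (j : Int) ∈ I ∧ C (j : Int)
    · simp [h1, List.mem_cons]
    · simp only [h1, if_false]
      by_cases hC : C i
      · rw [if_pos hC, PySem.List.pySetD_of_nonneg _ _ hi]
        by_cases hij : i.toNat = j
        · have hji : (j : Int) = i := by omega
          have hCj : C (j : Int) := hji ▸ hC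
          rw [hij, List.getElem?_set_self (by omega), if_pos ⟨by simp [hji], hCj⟩]
        · rw [List.getElem?_set_ne hij, if_neg]
          rintro ⟨hmem, hCj⟩
          rcases List.mem_cons.mp hmem with h | h
          · exact hij (by omega)
          · exact h1 ⟨h, hCj⟩
      · rw [if_neg hC, if_neg]
        rintro ⟨hmem, hCj⟩
        rcases List.mem_cons.mp hmem with h | h
        · exact hC (h ▸ hCj)
        · exact h1 ⟨h, hCj⟩

theorem pvMarks_getElem? (t : List Char) (p : Char) (j : Nat) (hj : j < t.length) :
    (pvMarks p t)[j]? =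
      some (if j + 1 < t.length ∧
              pvSand (if j = 0 then p else t.getD (j - 1) p) (t.getD j p) (t.getD (j + 1) p) = true
            then none else some (t.getD j p)) := by
  induction t generalizing p j with
  | nil => simp at hj
  | cons c t ih =>
    cases t with
    | nil =>
      have : j = 0 := by simpa using hj
      subst this
      simp [pvMarks]
    | cons n r =>
      cases j with
      | zero => simp [pvMarks]
      | succ k =>
        have hk : k < (n :: r).length := by simpa using hj
        simp only [pvMarks, List.getElem?_cons_succ]
        rw [ih (p := c) (j := k) hk]
        have hcur : (n :: r).getD k c = (c :: n :: r).getD (k + 1) p := by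
          rw [List.getD_eq_getElem _ _ hk, List.getD_eq_getElem _ _ (by simpa using hk)]
          simp
        by_cases hmid : k + 1 < (n :: r).length
        · have h1 : k + 1 + 1 < (c :: n :: r).length := by simp only [List.length_cons] at hmid ⊢; omega
          have hnext : (n :: r).getD (k + 1) c = (c :: n :: r).getD (k + 1 + 1) p := by
            rw [List.getD_eq_getElem _ _ hmid, List.getD_eq_getElem _ _ (by simpa using hmid)]
            simp
          have hprev : (if k = 0 then c else (n :: r).getD (k - 1) c)
              = (c :: n :: r).getD (k + 1 - 1) p := by
            cases k with
            | zero => simp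
            | succ m =>
              have hm : m < (n :: r).length := by
                simp only [List.length_cons] at hmid ⊢; omega
              have hm' : m + 1 < (c :: n :: r).length := by
                simp only [List.length_cons] at hmid ⊢; omega
              rw [if_neg (Nat.succ_ne_zero m), Nat.succ_sub_one, Nat.succ_sub_one,
                List.getD_eq_getElem _ _ hm, List.getD_eq_getElem _ _ hm']
              simp
          rw [hcur, hnext, hprev]
          have hiff : (k + 1 < (n :: r).length) ↔ (k + 1 + 1 < (c :: n :: r).length) := by
            simp only [List.length_cons]; omega
          rw [if_congr (and_congr hiff Iff.rfl) rfl rfl, if_neg (Nat.succ_ne_zero k)]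
        · have h1 : ¬ (k + 1 + 1 < (c :: n :: r).length) := by
            simp only [List.length_cons] at hmid ⊢; omega
          rw [if_neg (fun h => hmid h.1), if_neg (fun h => h1 h.1), hcur]

theorem pvMarksTop_length (sl : List Char) : (pvMarksTop sl).length = sl.length := by
  cases sl with
  | nil => rfl
  | cons a t => simp [pvMarksTop, pvMarks_length]

theorem pvMarksTop_filterMap (sl : List Char) :
    (pvMarksTop sl).filterMap id = pvSpecTop sl := by
  cases sl with
  | nil => rfl
  | cons a t =>
    rw [show pvMarksTop (a :: t) = some a :: pvMarks a t from rfl,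
      show List.filterMap id (some a :: pvMarks a t) = a :: List.filterMap id (pvMarks a t) from rfl,
      pvMarks_filterMap, pvSpecTop]

theorem pvA_eq_marksTop (sl : List Char) :
    ((PySem.List.pyRange 1 ((sl.length : Int) - 1) 1).foldl
      (fun li i =>
        if PySem.List.pyGetD sl (i - 1) ' ' ∉ (['a','e','i','o','u'] : List Char) ∧
            PySem.List.pyGetD sl (i + 1) ' ' ∉ (['a','e','i','o','u'] : List Char) ∧
            PySem.List.pyGetD sl i ' ' ∈ (['a','e','i','o','u'] : List Char)
        then PySem.List.pySetD li i none else li) (sl.map some))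
      = pvMarksTop sl := by
  apply List.ext_getElem?
  intro j
  by_cases hj : j < sl.length
  · rw [pvFoldA_getElem? _ _ _ j (by simpa using hj)
      (fun i hi => by have := PySem.List.mem_pyRange_one.mp hi; omega)]
    cases sl with
    | nil => simp at hj
    | cons a t =>
      cases j with
      | zero =>
        rw [if_neg (by rintro ⟨hmem, -⟩; have := PySem.List.mem_pyRange_one.mp hmem; omega)]
        simp [pvMarksTop]
      | succ k =>
        have hk : k < t.length := by simpa using hj
        simp only [pvMarksTop, List.getElem?_cons_succ]
        rw [pvMarks_getElem? t a k hk]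
        have e1 : ((k + 1 : Nat) : Int) - 1 = ((k : Nat) : Int) := by push_cast; ring
        have e2 : ((k + 1 : Nat) : Int) + 1 = ((k + 2 : Nat) : Int) := by push_cast; ring
        have gcur : (a :: t).getD (k + 1) ' ' = t.getD k a := by
          rw [List.getD_cons_succ, List.getD_eq_getElem _ _ hk, List.getD_eq_getElem _ _ hk]
        by_cases hmid : k + 1 < t.length
        · have hmem : ((k + 1 : Nat) : Int) ∈ PySem.List.pyRange 1 (((a :: t).length : Int) - 1) 1 := by
            rw [PySem.List.mem_pyRange_one]
            constructor
            · omega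
            · simp only [List.length_cons]; push_cast; omega
          have gprev : (a :: t).getD k ' ' = (if k = 0 then a else t.getD (k - 1) a) := by
            cases k with
            | zero => simp
            | succ m =>
              rw [if_neg (Nat.succ_ne_zero m), List.getD_cons_succ, Nat.succ_sub_one,
                List.getD_eq_getElem _ _ (by omega), List.getD_eq_getElem _ _ (by omega)]
          have gnext : (a :: t).getD (k + 2) ' ' = t.getD (k + 1) a := by
            rw [show k + 2 = (k + 1) + 1 from rfl, List.getD_cons_succ,
              List.getD_eq_getElem _ _ hmid, List.getD_eq_getElem _ _ hmid]
          have hCiff : (PySem.List.pyGetD (a :: t) (((k + 1 : Nat) : Int) - 1) ' ' ∉ (['a','e','i','o','u'] : List Char) ∧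
                PySem.List.pyGetD (a :: t) (((k + 1 : Nat) : Int) + 1) ' ' ∉ (['a','e','i','o','u'] : List Char) ∧
                PySem.List.pyGetD (a :: t) ((k + 1 : Nat) : Int) ' ' ∈ (['a','e','i','o','u'] : List Char))
              ↔ pvSand (if k = 0 then a else t.getD (k - 1) a) (t.getD k a) (t.getD (k + 1) a) = true := by
            rw [e1, e2, PySem.List.pyGetD_natCast, PySem.List.pyGetD_natCast,
              PySem.List.pyGetD_natCast, gprev, gcur, gnext, pvSand_iff]
          by_cases hS : pvSand (if k = 0 then a else t.getD (k - 1) a) (t.getD k a) (t.getD (k + 1) a) = true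
          · rw [if_pos ⟨hmem, hCiff.mpr hS⟩, if_pos ⟨hmid, hS⟩]
          · rw [if_neg (fun h => hS (hCiff.mp h.2)), if_neg (fun h => hS h.2)]
            rw [List.getElem?_map, List.getElem?_eq_getElem hj, List.getD_eq_getElem _ _ hk]
            simp
        · have hnm : ¬ (((k + 1 : Nat) : Int) ∈ PySem.List.pyRange 1 (((a :: t).length : Int) - 1) 1 ∧
              (PySem.List.pyGetD (a :: t) (((k + 1 : Nat) : Int) - 1) ' ' ∉ (['a','e','i','o','u'] : List Char) ∧
               PySem.List.pyGetD (a :: t) (((k + 1 : Nat) : Int) + 1) ' ' ∉ (['a','e','i','o','u'] : List Char) ∧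
               PySem.List.pyGetD (a :: t) ((k + 1 : Nat) : Int) ' ' ∈ (['a','e','i','o','u'] : List Char))) := by
            rintro ⟨hmem, -⟩
            have := PySem.List.mem_pyRange_one.mp hmem
            simp only [List.length_cons] at this
            push_cast at this
            omega
          rw [if_neg hnm, if_neg (fun h => hmid h.1)]
          rw [List.getElem?_map, List.getElem?_eq_getElem hj, List.getD_eq_getElem _ _ hk]
          simp
  · rw [List.getElem?_eq_none (by rw [pvFoldA_length]; simpa using hj),
      List.getElem?_eq_none (by rw [pvMarksTop_length]; omega)]

theorem pvA_eq (s : String) : Sandwiched_Vowel s = String.ofList (pvSpecTop s.toList) := by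
  show String.ofList _ = _
  rw [pvA_eq_marksTop s.toList, pvFilter_ne_none_filterMap, pvMarksTop_filterMap]

-- ---------- B side: run decomposition ----------

def pvDropR (r : List Char) : Bool := r.length == 1 && pvIsV (r.headD ' ')

def pvTailKeep : List (List Char) → List Char
  | [] => []
  | [r] => r
  | r :: r2 :: rs => (if pvDropR r then [] else r) ++ pvTailKeep (r2 :: rs)

def pvKeepTop : List (List Char) → List Char
  | [] => []
  | r :: rs => r ++ pvTailKeep rs

theorem pvRuns_nil : pvRuns [] = [] := by rw [pvRuns]

theorem pvRuns_cons (c : Char) (t : List Char) :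
    pvRuns (c :: t) = (c :: t.takeWhile (fun d => pvIsV d == pvIsV c)) ::
      pvRuns (t.dropWhile (fun d => pvIsV d == pvIsV c)) := by rw [pvRuns]

theorem pvEnumTail (rs : List (List Char)) (k L : Int) (hk : 1 ≤ k)
    (hL : L = k + rs.length - 1) :
    (((PySem.List.enumerate rs k).filter
      (fun jr => jr.1 == 0 || jr.1 == L ||
        !(jr.2.length == 1 && pvIsV (jr.2.headD ' ')))).map (·.2)).flatten = pvTailKeep rs := by
  induction rs generalizing k with
  | nil => simp [PySem.List.enumerate, pvTailKeep]
  | cons r rs ih =>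
    cases rs with
    | nil =>
      have h0 : (k == 0) = false := by simp; omega
      have hLk : (k == L) = true := by simp at hL ⊢; omega
      simp [PySem.List.enumerate_cons, PySem.List.enumerate_nil, h0, hLk, pvTailKeep]
    | cons r2 rs' =>
      have h0 : (k == 0) = false := by simp; omega
      have hLk : (k == L) = false := by
        simp only [List.length_cons] at hL
        simp; push_cast at hL; omega
      rw [PySem.List.enumerate_cons, List.filter_cons]
      have hrec := ih (k + 1) (by omega)
        (by simp only [List.length_cons] at hL ⊢; push_cast at hL ⊢; omega)
      have hcond : ((k, r).1 == 0 || (k, r).1 == L ||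
          !((k, r).2.length == 1 && pvIsV ((k, r).2.headD ' '))) = !pvDropR r := by
        simp only [pvDropR, h0, hLk, Bool.false_or]
      rw [hcond]
      cases hd : pvDropR r
      · simp only [Bool.not_false, if_pos, List.map_cons, List.flatten_cons]
        rw [hrec, pvTailKeep, hd, if_neg (by simp)]
      · simp only [Bool.not_true, Bool.false_eq_true, if_neg, not_false_iff]
        rw [hrec, pvTailKeep, hd, if_pos rfl, List.nil_append]

theorem pvB_keepTop (s : String) :
    Sandwiched_Vowel_alt s = String.ofList (pvKeepTop (pvRuns s.toList)) := by
  rw [Sandwiched_Vowel_alt]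
  cases hr : pvRuns s.toList with
  | nil => simp [PySem.List.enumerate, pvKeepTop]
  | cons r rs =>
    rw [PySem.List.enumerate_cons, List.filter_cons]
    have h0 : (((0 : Int), r).1 == 0 || ((0 : Int), r).1 == ((r :: rs).length : Int) - 1 ||
        !(((0 : Int), r).2.length == 1 && pvIsV (((0 : Int), r).2.headD ' '))) = true := by
      simp
    rw [h0, if_pos (by trivial)]
    simp only [List.map_cons, List.flatten_cons]
    rw [pvEnumTail rs (0 + 1) (((r :: rs).length : Int) - 1) (by omega)
      (by simp only [List.length_cons]; push_cast; ring)]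
    rfl

theorem pvSand_of_eqV (p c n : Char) (h : pvIsV c = pvIsV p) : pvSand p c n = false := by
  simp only [pvSand]
  cases hv : pvIsV c
  · simp
  · rw [hv] at h; simp [← h]

theorem pvSand_of_next_eqV (p c n : Char) (h : pvIsV n = pvIsV c) : pvSand p c n = false := by
  simp only [pvSand, h]
  cases pvIsV c <;> simp

theorem pvSpec_congr (p q : Char) (t : List Char) (h : pvIsV p = pvIsV q) :
    pvSpec p t = pvSpec q t := by
  cases t with
  | nil => rfl
  | cons c t =>
    cases t with
    | nil => rfl
    | cons n r => simp [pvSpec, pvSand, h]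

theorem pvSpec_cons_keep (p c : Char) (X : List Char)
    (h : ∀ n, X.head? = some n → pvSand p c n = false) :
    pvSpec p (c :: X) = c :: pvSpec c X := by
  cases X with
  | nil => rfl
  | cons n r => simp [pvSpec, h n rfl]

theorem pvFirstRun (run : List Char) (rest : List Char) (p : Char)
    (hrun : ∀ d ∈ run, pvIsV d = pvIsV p) :
    pvSpec p (run ++ rest) = run ++ pvSpec p rest := by
  induction run generalizing p with
  | nil => simp
  | cons c run' ih =>
    have hc : pvIsV c = pvIsV p := hrun c (by simp)
    rw [List.cons_append, pvSpec_cons_keep p c (run' ++ rest)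
        (fun n _ => pvSand_of_eqV p c n hc),
      pvSpec_congr c p (run' ++ rest) hc,
      ih p (fun d hd => hrun d (by simp [hd]))]
    simp

theorem pvDropWhile_head (c c' : Char) (t t' : List Char)
    (h : t.dropWhile (fun d => pvIsV d == pvIsV c) = c' :: t') : pvIsV c' = !pvIsV c := by
  have hh := List.head?_dropWhile_not (fun d => pvIsV d == pvIsV c) t
  rw [h] at hh
  simp only [List.head?_cons] at hh
  cases hv : pvIsV c' <;> cases hvc : pvIsV c <;> simp_all

theorem pvMainRec (l : List Char) : ∀ (p : Char),
    (∀ c t, l = c :: t → pvIsV p = !pvIsV c) →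
    pvSpec p l = pvTailKeep (pvRuns l) := by
  induction l using pvRuns.induct with
  | case1 => intro p _; rw [pvRuns_nil]; rfl
  | case2 c t ih =>
    intro p hp
    have hp' : pvIsV p = !pvIsV c := hp c t rfl
    have hsplit : t.takeWhile (fun d => pvIsV d == pvIsV c)
        ++ t.dropWhile (fun d => pvIsV d == pvIsV c) = t := List.takeWhile_append_dropWhile
    have hrunmem : ∀ d ∈ t.takeWhile (fun d => pvIsV d == pvIsV c), pvIsV d = pvIsV c :=
      fun d hd => by simpa using List.mem_takeWhile_imp hd
    rw [pvRuns_cons]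
    cases hrest : t.dropWhile (fun d => pvIsV d == pvIsV c) with
    | nil =>
      have ht : t.takeWhile (fun d => pvIsV d == pvIsV c) = t := by
        conv_rhs => rw [← hsplit, hrest]
        rw [List.append_nil]
      rw [pvRuns_nil, ht]
      rw [show pvTailKeep [c :: t] = c :: t from rfl]
      rw [ht] at hrunmem
      cases t with
      | nil => rfl
      | cons x xs =>
        have hx : pvIsV x = pvIsV c := hrunmem x (by simp)
        rw [pvSpec_cons_keep p c (x :: xs)
          (fun n hn => by
            simp only [List.head?_cons, Option.some.injEq] at hn
            rw [hn] at hx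
            exact pvSand_of_next_eqV p c n hx)]
        have := pvFirstRun (x :: xs) [] c (fun d hd => by rw [hrunmem d hd])
        simpa [pvSpec] using this
    | cons n r =>
      have hn : pvIsV n = !pvIsV c := pvDropWhile_head c n t r hrest
      rw [hrest] at ih
      have hrecv : pvSpec c (n :: r) = pvTailKeep (pvRuns (n :: r)) := by
        apply ih
        intro c' t' he
        injection he with h1 h2
        rw [← h1, hn]
        cases pvIsV c <;> rfl
      rw [pvRuns_cons n r]
      rw [show pvTailKeep ((c :: t.takeWhile (fun d => pvIsV d == pvIsV c)) ::
            (n :: r.takeWhile (fun d => pvIsV d == pvIsV n)) ::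
            pvRuns (r.dropWhile (fun d => pvIsV d == pvIsV n)))
          = (if pvDropR (c :: t.takeWhile (fun d => pvIsV d == pvIsV c)) then []
             else (c :: t.takeWhile (fun d => pvIsV d == pvIsV c))) ++
            pvTailKeep ((n :: r.takeWhile (fun d => pvIsV d == pvIsV n)) ::
              pvRuns (r.dropWhile (fun d => pvIsV d == pvIsV n))) from rfl]
      rw [← pvRuns_cons n r, ← hrecv]
      cases hrun : t.takeWhile (fun d => pvIsV d == pvIsV c) with
      | nil =>
        have ht : t = n :: r := by
          conv_lhs => rw [← hsplit, hrun, hrest]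
          rw [List.nil_append]
        rw [ht]
        have hsand : pvSand p c n = pvIsV c := by
          simp only [pvSand, hp', hn]
          cases pvIsV c <;> rfl
        have hdrop : pvDropR [c] = pvIsV c := by simp [pvDropR]
        rw [hdrop,
          show pvSpec p (c :: n :: r)
            = (if pvSand p c n then [] else [c]) ++ pvSpec c (n :: r) from rfl,
          hsand]
      | cons x xs =>
        have hx : pvIsV x = pvIsV c := hrunmem x (by rw [hrun]; simp)
        have ht : t = (x :: xs) ++ (n :: r) := by
          conv_lhs => rw [← hsplit, hrun, hrest]
        have hdropF : pvDropR (c :: x :: xs) = false := by simp [pvDropR]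
        rw [ht, hdropF,
          show (x :: xs) ++ (n :: r) = x :: (xs ++ (n :: r)) from rfl,
          pvSpec_cons_keep p c (x :: (xs ++ (n :: r)))
            (fun m hm => by
              simp only [List.head?_cons, Option.some.injEq] at hm
              rw [hm] at hx
              exact pvSand_of_next_eqV p c m hx),
          show x :: (xs ++ (n :: r)) = (x :: xs) ++ (n :: r) from rfl,
          pvFirstRun (x :: xs) (n :: r) c
            (fun d hd => by rw [hrunmem d (by rw [hrun]; exact hd)])]
        simp

theorem pvSpecTop_eq_keepTop (l : List Char) : pvSpecTop l = pvKeepTop (pvRuns l) := by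
  cases l with
  | nil => rw [pvRuns_nil]; rfl
  | cons a t =>
    rw [pvRuns_cons, pvSpecTop,
      show pvKeepTop ((a :: t.takeWhile (fun d => pvIsV d == pvIsV a)) ::
          pvRuns (t.dropWhile (fun d => pvIsV d == pvIsV a)))
        = (a :: t.takeWhile (fun d => pvIsV d == pvIsV a)) ++
          pvTailKeep (pvRuns (t.dropWhile (fun d => pvIsV d == pvIsV a))) from rfl]
    have hsplit : t.takeWhile (fun d => pvIsV d == pvIsV a)
        ++ t.dropWhile (fun d => pvIsV d == pvIsV a) = t := List.takeWhile_append_dropWhile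
    conv_lhs => rw [← hsplit]
    rw [pvFirstRun _ _ a (fun d hd => by simpa using List.mem_takeWhile_imp hd),
      pvMainRec (t.dropWhile (fun d => pvIsV d == pvIsV a)) a
        (fun c' t' he => by rw [pvDropWhile_head a c' t t' he]; cases pvIsV a <;> rfl)]
    simp

theorem pvB_eq (s : String) : Sandwiched_Vowel_alt s = String.ofList (pvSpecTop s.toList) := by
  rw [pvB_keepTop, pvSpecTop_eq_keepTop]

-- ===== VERDICT (by name: the statement is the Claim_ definition above) =====
theorem Sandwiched_Vowel_spec : Claim_equal_Sandwiched_Vowel := by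
  intro s _
  unfold Spec_Sandwiched_Vowel
  rw [pvA_eq, pvB_eq]
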